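-- pv_equiv track=rewrite | github.com/mayank88-py/leetcode-top-interview-150 | graph_bfs/433_minimum_genetic_mutation.py | min_mutation_level_order_bfs
-- ===== SOURCE A (Python) =====
-- from typing import List, Set
--
-- def min_mutation_level_order_bfs(start: str, end: str, bank: List[str]) -> int:
--     """
--     Level-order BFS approach.
--
--     Time Complexity: O(N * M * 4) where N is bank size and M is gene length
--     Space Complexity: O(N) - level sets and visited set
--
--     Algorithm:
--     1. Process genes level by level
--     2. Each level represents mutations with same count
--     3. Clear separation between mutation counts
--     """
--     if end not in bank:
--         return -1
--
--     bank_set = set(bank)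
--     current_level = {start}
--     visited = {start}
--     mutations = 0
--     genes = ['A', 'C', 'G', 'T']
--
--     while current_level:
--         next_level = set()
--
--         for current_gene in current_level:
--             if current_gene == end:
--                 return mutations
--
--             # Try all single character mutations
--             for i in range(len(current_gene)):
--                 for gene in genes:
--                     if gene != current_gene[i]:
--                         new_gene = current_gene[:i] + gene + current_gene[i+1:]
--
--                         if new_gene in bank_set and new_gene not in visited:
--                             visited.add(new_gene)
--                             next_level.add(new_gene)
--
--         current_level = next_level
--         mutations += 1
--
--     return -1
-- ===== SOURCE B (Python) =====
-- def min_mutation_level_order_bfs(start: str, end: str, bank):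
--     """Frontier BFS that scans the bank with a mutation predicate instead of
--     generating all 3*M candidate strings per gene."""
--     if end not in bank:
--         return -1
--
--     def is_mutation(a, b):
--         if not a or not b:
--             return False
--         if a[0] == b[0]:
--             return is_mutation(a[1:], b[1:])
--         return a[1:] == b[1:] and b[0] in "ACGT"
--
--     frontier = [start]
--     visited = {start}
--     steps = 0
--     while frontier:
--         if end in frontier:
--             return steps
--         nxt = []
--         for g in bank:
--             if g not in visited and g not in nxt and any(is_mutation(c, g) for c in frontier):
--                 nxt.append(g)
--         visited.update(nxt)
--         frontier = nxt
--         steps += 1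
--     return -1
-- ===== Notes on version B (the rewrite author's own statement) =====
-- stated objective: alternative
-- what changed: Instead of generating all 3*M single-character ACGT mutations of each frontier gene and probing a hash set of the bank, B scans the bank once per BFS round with a single-valid-mutation predicate (and keeps a plain frontier list), returning the identical level count.
import Mathlib
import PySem

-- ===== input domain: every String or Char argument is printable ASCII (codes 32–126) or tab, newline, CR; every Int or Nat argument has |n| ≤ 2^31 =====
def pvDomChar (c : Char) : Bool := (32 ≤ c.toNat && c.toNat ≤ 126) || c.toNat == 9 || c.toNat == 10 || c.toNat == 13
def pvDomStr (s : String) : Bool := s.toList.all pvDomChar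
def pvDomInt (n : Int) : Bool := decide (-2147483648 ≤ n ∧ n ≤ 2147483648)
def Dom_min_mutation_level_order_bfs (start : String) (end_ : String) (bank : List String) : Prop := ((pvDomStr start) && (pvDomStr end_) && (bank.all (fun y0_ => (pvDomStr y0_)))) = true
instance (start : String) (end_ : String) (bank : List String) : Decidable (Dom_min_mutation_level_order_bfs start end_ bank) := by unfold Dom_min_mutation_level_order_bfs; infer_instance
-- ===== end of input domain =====

-- B replaces A's per-gene generation of all 3*len(gene) candidate ACGT mutations (checked against a
-- set of the bank) by a scan of the bank with a "is a single valid mutation" predicate; same value.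
-- Both while-loops are ported with fuel bank.length + 2, which bounds the number of BFS rounds
-- (every round after the first consumes at least one fresh bank gene).

-- the constant "ACGT" / ['A','C','G','T'] both programs carry
def pvACGT : List Char := ['A', 'C', 'G', 'T']

-- ===== PORT A =====
-- strings are carried as List Char; state = (visited, next_level), both PySem sets
-- 'if new_gene in bank_set and new_gene not in visited: visited.add(new_gene); next_level.add(new_gene)'
def pvTryAdd (bankSet : List (List Char)) (st : List (List Char) × List (List Char))
    (ng : List Char) : List (List Char) × List (List Char) :=
  if ng ∈ bankSet ∧ ng ∉ st.1 then (PySem.Set.add st.1 ng, PySem.Set.add st.2 ng) else st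

-- 'for i in range(len(current_gene)): for gene in genes: …'; the slices c[:i] and c[i+1:] with
-- 0 ≤ i < len c are take i / drop (i+1) (PySem.List.slice_to / slice_from) and c[i] is c.getD i _
def pvExpandGene (bankSet : List (List Char)) (c : List Char)
    (st : List (List Char) × List (List Char)) : List (List Char) × List (List Char) :=
  (List.range c.length).foldl (fun st2 i =>
    pvACGT.foldl (fun st3 g =>
      if g ≠ c.getD i 'A' then pvTryAdd bankSet st3 (c.take i ++ g :: c.drop (i + 1)) else st3) st2) st

-- the body of 'for current_gene in current_level'; none = the early 'return mutations'
def pvExpandLevel (bankSet : List (List Char)) (endL : List Char) :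
    List (List Char) → List (List Char) × List (List Char) →
    Option (List (List Char) × List (List Char))
  | [], st => some st
  | c :: rest, st =>
    if c = endL then none else pvExpandLevel bankSet endL rest (pvExpandGene bankSet c st)

-- 'while current_level:' (fuel only makes the loop structurally recursive; it is never exhausted)
def pvLoopA (bankSet : List (List Char)) (endL : List Char) :
    Nat → List (List Char) → List (List Char) → Int → Int
  | 0, _, _, _ => -1
  | Nat.succ fuel, lvl, vis, m =>
    if lvl = [] then -1
    else
      match pvExpandLevel bankSet endL lvl (vis, PySem.Set.empty) with
      | none => m
      | some (v', nxt) => pvLoopA bankSet endL fuel nxt v' (m + 1)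

def min_mutation_level_order_bfs (start : String) (end_ : String) (bank : List String) : Int :=
  if end_.toList ∉ bank.map String.toList then -1
  else
    pvLoopA (PySem.Set.ofList (bank.map String.toList)) end_.toList (bank.length + 2)
      (PySem.Set.ofList [start.toList]) (PySem.Set.ofList [start.toList]) 0

-- ===== PORT B =====
-- Source B's recursive is_mutation(a, b)
def pvMut : List Char → List Char → Bool
  | [], _ => false
  | _ :: _, [] => false
  | a :: as_, b :: bs => if a = b then pvMut as_ bs else (as_ == bs && pvACGT.contains b)

-- 'nxt = []; for g in bank: if g not in visited and g not in nxt and any(is_mutation(c, g) for c in frontier): nxt.append(g)'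
def pvNext (bankL : List (List Char)) (vis front : List (List Char)) : List (List Char) :=
  bankL.foldl (fun acc g =>
    if g ∉ vis ∧ g ∉ acc ∧ front.any (fun c => pvMut c g) then acc ++ [g] else acc) []

-- 'while frontier:' (same fuel bound as A's loop)
def pvLoopB (bankL : List (List Char)) (endL : List Char) :
    Nat → List (List Char) → List (List Char) → Int → Int
  | 0, _, _, _ => -1
  | Nat.succ fuel, front, vis, steps =>
    if front = [] then -1
    else if endL ∈ front then steps
    else
      pvLoopB bankL endL fuel (pvNext bankL vis front)
        (PySem.Set.update vis (pvNext bankL vis front)) (steps + 1)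

def min_mutation_level_order_bfs_alt (start : String) (end_ : String) (bank : List String) : Int :=
  if end_.toList ∉ bank.map String.toList then -1
  else
    pvLoopB (bank.map String.toList) end_.toList (bank.length + 2)
      [start.toList] (PySem.Set.ofList [start.toList]) 0

-- ===== PRECONDITION & SPEC =====
def Spec_min_mutation_level_order_bfs (start : String) (end_ : String) (bank : List String) (out : Int) : Prop := out = min_mutation_level_order_bfs_alt start end_ bank
instance (start : String) (end_ : String) (bank : List String) (out : Int) : Decidable (Spec_min_mutation_level_order_bfs start end_ bank out) := by unfold Spec_min_mutation_level_order_bfs; infer_instance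

-- ===== CLAIM (what is proved, stated in full; the proofs are below) =====
def Claim_equal_min_mutation_level_order_bfs : Prop := ∀ (start : String) (end_ : String) (bank : List String), Dom_min_mutation_level_order_bfs start end_ bank → Spec_min_mutation_level_order_bfs start end_ bank (min_mutation_level_order_bfs start end_ bank)

-- ===== LEMMAS AND PROOFS =====

-- A's single-position ACGT replacements of c are exactly the strings pvMut c accepts
theorem pvMut_iff (c x : List Char) :
    pvMut c x = true ↔
      ∃ i, i < c.length ∧ ∃ g ∈ pvACGT, g ≠ c.getD i 'A' ∧ x = c.take i ++ g :: c.drop (i + 1) := by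
  induction c generalizing x with
  | nil => simp [pvMut]
  | cons ch cs ih =>
    cases x with
    | nil =>
      simp only [pvMut]
      constructor
      · intro h; exact absurd h (by simp)
      · rintro ⟨i, _, g, _, _, hx⟩
        cases i with
        | zero => simp at hx
        | succ j => simp [List.take_succ_cons] at hx
    | cons y ys =>
      by_cases h : ch = y
      · subst h
        simp only [pvMut, if_true]
        rw [ih]
        constructor
        · rintro ⟨i, hi, g, hg, hne, hx⟩
          exact ⟨i + 1, by simpa using hi, g, hg, by simpa using hne, by simp [hx]⟩
        · rintro ⟨i, hi, g, hg, hne, hx⟩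
          cases i with
          | zero =>
            simp only [List.take_zero, List.nil_append, List.drop_succ_cons, List.drop_zero,
              List.cons.injEq] at hx
            exact absurd hx.1.symm (by simpa using hne)
          | succ j =>
            simp only [List.take_succ_cons, List.cons_append, List.drop_succ_cons,
              List.cons.injEq] at hx
            exact ⟨j, by simpa using hi, g, hg, by simpa using hne, hx.2⟩
      · simp only [pvMut, if_neg h, Bool.and_eq_true, beq_iff_eq, List.contains_eq_mem,
          decide_eq_true_eq]
        constructor
        · rintro ⟨hcs, hy⟩
          exact ⟨0, by simp, y, hy, by simpa using Ne.symm h, by simp [hcs]⟩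
        · rintro ⟨i, hi, g, hg, hne, hx⟩
          cases i with
          | zero =>
            simp only [List.take_zero, List.nil_append, List.drop_succ_cons, List.drop_zero,
              List.cons.injEq] at hx
            exact ⟨hx.2.symm, hx.1 ▸ hg⟩
          | succ j =>
            simp only [List.take_succ_cons, List.cons_append, List.cons.injEq] at hx
            exact absurd hx.1.symm h
theorem pvTryAdd_spec (bankSet : List (List Char)) (v n : List (List Char)) (ng : List Char)
    (hinv : ∀ y ∈ n, y ∈ v) :
    (∀ x, x ∈ (pvTryAdd bankSet (v, n) ng).2 ↔ x ∈ n ∨ (x ∈ bankSet ∧ x ∉ v ∧ x = ng)) ∧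
    (∀ x, x ∈ (pvTryAdd bankSet (v, n) ng).1 ↔ x ∈ v ∨ x ∈ (pvTryAdd bankSet (v, n) ng).2) := by
  unfold pvTryAdd
  split_ifs with h
  · refine ⟨fun x => ?_, fun x => ?_⟩ <;> simp only [PySem.Set.mem_add] <;>
      by_cases hx : x = ng <;> subst_eqs <;> simp_all
  · refine ⟨fun x => ?_, fun x => ?_⟩ <;>
      by_cases hx : x = ng <;> subst_eqs <;> simp_all

-- composing per-element contracts over a foldl
theorem pvFold_contract {α : Type} (bankSet : List (List Char))
    (step : List (List Char) × List (List Char) → α → List (List Char) × List (List Char))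
    (P : α → List Char → Prop)
    (hstep : ∀ v n a, (∀ y ∈ n, y ∈ v) →
      (∀ x, x ∈ (step (v, n) a).2 ↔ x ∈ n ∨ (x ∈ bankSet ∧ x ∉ v ∧ P a x)) ∧
      (∀ x, x ∈ (step (v, n) a).1 ↔ x ∈ v ∨ x ∈ (step (v, n) a).2)) :
    ∀ (L : List α) (v n : List (List Char)), (∀ y ∈ n, y ∈ v) →
      (∀ x, x ∈ (L.foldl step (v, n)).2 ↔ x ∈ n ∨ (x ∈ bankSet ∧ x ∉ v ∧ ∃ a ∈ L, P a x)) ∧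
      (∀ x, x ∈ (L.foldl step (v, n)).1 ↔ x ∈ v ∨ x ∈ (L.foldl step (v, n)).2) := by
  intro L
  induction L with
  | nil => intro v n hinv; refine ⟨fun x => by simp, fun x => by simpa using hinv x⟩
  | cons a L ih =>
    intro v n hinv
    obtain ⟨h2, h1⟩ := hstep v n a hinv
    have hinv1 : ∀ y ∈ (step (v, n) a).2, y ∈ (step (v, n) a).1 := fun y hy => (h1 y).2 (Or.inr hy)
    have ihh := ih (step (v, n) a).1 (step (v, n) a).2 hinv1
    rw [Prod.mk.eta] at ihh
    obtain ⟨ih2, ih1⟩ := ihh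
    simp only [List.foldl_cons]
    constructor
    · intro x
      rw [ih2 x]
      have hm : (∃ b ∈ a :: L, P b x) ↔ P a x ∨ ∃ b ∈ L, P b x := by simp
      rw [hm]
      have := h2 x
      have := h1 x
      tauto
    · intro x
      rw [ih1 x, ih2 x]
      have := h2 x
      have := h1 x
      tauto
-- A's inner double loop over positions and genes, characterised through pvMut
theorem pvExpandGene_spec (bankSet : List (List Char)) (c : List Char) (v n : List (List Char))
    (hinv : ∀ y ∈ n, y ∈ v) :
    (∀ x, x ∈ (pvExpandGene bankSet c (v, n)).2 ↔
        x ∈ n ∨ (x ∈ bankSet ∧ x ∉ v ∧ pvMut c x = true)) ∧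
    (∀ x, x ∈ (pvExpandGene bankSet c (v, n)).1 ↔
        x ∈ v ∨ x ∈ (pvExpandGene bankSet c (v, n)).2) := by
  have inner : ∀ (i : Nat) (v n : List (List Char)), (∀ y ∈ n, y ∈ v) →
      (∀ x, x ∈ (pvACGT.foldl (fun st3 g =>
            if g ≠ c.getD i 'A' then pvTryAdd bankSet st3 (c.take i ++ g :: c.drop (i + 1)) else st3)
            (v, n)).2 ↔
          x ∈ n ∨ (x ∈ bankSet ∧ x ∉ v ∧
            ∃ g ∈ pvACGT, g ≠ c.getD i 'A' ∧ x = c.take i ++ g :: c.drop (i + 1))) ∧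
      (∀ x, x ∈ (pvACGT.foldl (fun st3 g =>
            if g ≠ c.getD i 'A' then pvTryAdd bankSet st3 (c.take i ++ g :: c.drop (i + 1)) else st3)
            (v, n)).1 ↔
          x ∈ v ∨ x ∈ (pvACGT.foldl (fun st3 g =>
            if g ≠ c.getD i 'A' then pvTryAdd bankSet st3 (c.take i ++ g :: c.drop (i + 1)) else st3)
            (v, n)).2) := by
    intro i v n hinv
    refine pvFold_contract bankSet _
      (fun g x => g ≠ c.getD i 'A' ∧ x = c.take i ++ g :: c.drop (i + 1)) ?_ pvACGT v n hinv
    intro v' n' g hinv'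
    by_cases hg : g ≠ c.getD i 'A'
    · simp only [if_pos hg]
      obtain ⟨h2, h1⟩ := pvTryAdd_spec bankSet v' n' (c.take i ++ g :: c.drop (i + 1)) hinv'
      exact ⟨fun x => by rw [h2 x]; tauto, h1⟩
    · simp only [if_neg hg]
      refine ⟨fun x => by tauto, fun x => ?_⟩
      have := hinv' x
      tauto
  have outer := pvFold_contract bankSet
    (fun st2 i => pvACGT.foldl (fun st3 g =>
      if g ≠ c.getD i 'A' then pvTryAdd bankSet st3 (c.take i ++ g :: c.drop (i + 1)) else st3) st2)
    (fun i x => ∃ g ∈ pvACGT, g ≠ c.getD i 'A' ∧ x = c.take i ++ g :: c.drop (i + 1))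
    (fun v n i hinv => inner i v n hinv) (List.range c.length) v n hinv
  unfold pvExpandGene
  obtain ⟨o2, o1⟩ := outer
  refine ⟨fun x => ?_, o1⟩
  rw [o2 x, pvMut_iff c x]
  simp only [List.mem_range]

-- the early 'return mutations' fires exactly when end is in the current level
theorem pvExpandLevel_none_iff (bankSet : List (List Char)) (endL : List Char)
    (lvl : List (List Char)) :
    ∀ st, pvExpandLevel bankSet endL lvl st = none ↔ endL ∈ lvl := by
  induction lvl with
  | nil => intro st; simp [pvExpandLevel]
  | cons c rest ih =>
    intro st
    by_cases h : c = endL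
    · simp [pvExpandLevel, h]
    · simp only [pvExpandLevel, if_neg h, ih, List.mem_cons]
      constructor
      · exact Or.inr
      · rintro (h' | h')
        · exact absurd h'.symm h
        · exact h'

-- with end not in the level, the level loop is a fold of pvExpandGene
theorem pvExpandLevel_eq_foldl (bankSet : List (List Char)) (endL : List Char)
    (lvl : List (List Char)) (hend : endL ∉ lvl) :
    ∀ st, pvExpandLevel bankSet endL lvl st =
      some (lvl.foldl (fun st c => pvExpandGene bankSet c st) st) := by
  induction lvl with
  | nil => intro st; rfl
  | cons c rest ih =>
    intro st
    have hc : c ≠ endL := fun h => hend (h ▸ List.mem_cons_self)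
    have hrest : endL ∉ rest := fun h => hend (List.mem_cons_of_mem _ h)
    simp only [pvExpandLevel, if_neg hc, List.foldl_cons, ih hrest]

-- full characterisation of one BFS round of A
theorem pvExpandLevel_spec (bankSet : List (List Char)) (endL : List Char)
    (lvl : List (List Char)) (hend : endL ∉ lvl) (v n : List (List Char))
    (hinv : ∀ y ∈ n, y ∈ v) :
    ∃ v' n', pvExpandLevel bankSet endL lvl (v, n) = some (v', n') ∧
      (∀ x, x ∈ n' ↔ x ∈ n ∨ (x ∈ bankSet ∧ x ∉ v ∧ ∃ c ∈ lvl, pvMut c x = true)) ∧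
      (∀ x, x ∈ v' ↔ x ∈ v ∨ x ∈ n') := by
  have hc := pvFold_contract bankSet (fun st c => pvExpandGene bankSet c st)
    (fun c x => pvMut c x = true)
    (fun v n c hinv => pvExpandGene_spec bankSet c v n hinv) lvl v n hinv
  refine ⟨(lvl.foldl (fun st c => pvExpandGene bankSet c st) (v, n)).1,
    (lvl.foldl (fun st c => pvExpandGene bankSet c st) (v, n)).2, ?_, hc.1, hc.2⟩
  rw [pvExpandLevel_eq_foldl bankSet endL lvl hend]

-- B's bank scan collects exactly the unvisited single mutations of the frontier
theorem pvNext_go (bankL vis front : List (List Char)) :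
    ∀ (acc : List (List Char)) (x : List Char),
      x ∈ bankL.foldl (fun acc g =>
          if g ∉ vis ∧ g ∉ acc ∧ front.any (fun c => pvMut c g) then acc ++ [g] else acc) acc ↔
        x ∈ acc ∨ (x ∈ bankL ∧ x ∉ vis ∧ ∃ c ∈ front, pvMut c x = true) := by
  induction bankL with
  | nil => intro acc x; simp
  | cons g rest ih =>
    intro acc x
    simp only [List.foldl_cons]
    split_ifs with hg
    · rw [ih]
      simp only [List.mem_append, List.mem_cons, List.any_eq_true] at *
      by_cases hx : x = g
      · subst hx; tauto
      · tauto
    · rw [ih]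
      simp only [List.mem_cons, List.any_eq_true] at *
      by_cases hx : x = g
      · subst hx
        constructor
        · rintro (hacc | ⟨hr, hv, hE⟩)
          · exact Or.inl hacc
          · exact Or.inr ⟨Or.inr hr, hv, hE⟩
        · rintro (hacc | ⟨_, hv, hE⟩)
          · exact Or.inl hacc
          · by_cases hacc2 : x ∈ acc
            · exact Or.inl hacc2
            · exact absurd hE (by simpa using fun c hc hm => (hg ⟨hv, hacc2, ⟨c, hc, hm⟩⟩ : False))
      · tauto

theorem pvNext_mem (bankL vis front : List (List Char)) (x : List Char) :
    x ∈ pvNext bankL vis front ↔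
      x ∈ bankL ∧ x ∉ vis ∧ ∃ c ∈ front, pvMut c x = true := by
  unfold pvNext
  rw [pvNext_go]
  simp
-- the two BFS loops agree whenever their frontiers and visited sets agree as sets
theorem pvLoop_eq (bankSet bankL : List (List Char)) (endL : List Char)
    (hbank : ∀ x, x ∈ bankSet ↔ x ∈ bankL) :
    ∀ (fuel : Nat) (lvl vis front visB : List (List Char)) (m : Int),
      (∀ x, x ∈ lvl ↔ x ∈ front) → (∀ x, x ∈ vis ↔ x ∈ visB) →
      pvLoopA bankSet endL fuel lvl vis m = pvLoopB bankL endL fuel front visB m := by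
  intro fuel
  induction fuel with
  | zero => intros; rfl
  | succ fuel ih =>
    intro lvl vis front visB m hl hv
    by_cases hemp : lvl = []
    · subst hemp
      have hf : front = [] := by
        rw [List.eq_nil_iff_forall_not_mem]
        intro x hx
        simpa using (hl x).mpr hx
      simp [pvLoopA, pvLoopB, hf]
    · have hfne : front ≠ [] := by
        intro h
        apply hemp
        rw [List.eq_nil_iff_forall_not_mem]
        intro x hx
        have := (hl x).mp hx
        rw [h] at this
        simp at this
      by_cases hend : endL ∈ lvl
      · have hendf : endL ∈ front := (hl endL).mp hend
        simp only [pvLoopA, pvLoopB, if_neg hemp, if_neg hfne, if_pos hendf,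
          (pvExpandLevel_none_iff bankSet endL lvl (vis, PySem.Set.empty)).mpr hend]
      · have hendf : endL ∉ front := fun h => hend ((hl endL).mpr h)
        obtain ⟨v', n', heq, hn', hv'⟩ :=
          pvExpandLevel_spec bankSet endL lvl hend vis PySem.Set.empty (by intro y hy; simp at hy)
        have hfront : ∀ x, x ∈ n' ↔ x ∈ pvNext bankL visB front := by
          intro x
          rw [hn' x, pvNext_mem]
          have hex : (∃ c ∈ lvl, pvMut c x = true) ↔ (∃ c ∈ front, pvMut c x = true) := by
            constructor
            · rintro ⟨c, hc, hm⟩; exact ⟨c, (hl c).mp hc, hm⟩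
            · rintro ⟨c, hc, hm⟩; exact ⟨c, (hl c).mpr hc, hm⟩
          simp only [PySem.Set.empty, List.not_mem_nil, false_or]
          rw [hbank x, hv x, hex]
        have hvis : ∀ x, x ∈ v' ↔ x ∈ PySem.Set.update visB (pvNext bankL visB front) := by
          intro x
          rw [hv' x, PySem.Set.mem_update, hv x, hfront x]
        simp only [pvLoopA, pvLoopB, if_neg hemp, if_neg hfne, if_neg hendf, heq]
        exact ih n' v' (pvNext bankL visB front) (PySem.Set.update visB (pvNext bankL visB front)) (m + 1) hfront hvis
-- ===== VERDICT (by name: the statement is the Claim_ definition above) =====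
theorem min_mutation_level_order_bfs_spec : Claim_equal_min_mutation_level_order_bfs := by
  intro start end_ bank _
  unfold Spec_min_mutation_level_order_bfs
  unfold min_mutation_level_order_bfs min_mutation_level_order_bfs_alt
  by_cases hmem : end_.toList ∉ bank.map String.toList
  · simp [hmem]
  · simp only [if_neg hmem]
    exact pvLoop_eq (PySem.Set.ofList (bank.map String.toList)) (bank.map String.toList)
      end_.toList (fun x => PySem.Set.mem_ofList _ x) (bank.length + 2)
      (PySem.Set.ofList [start.toList]) (PySem.Set.ofList [start.toList])
      [start.toList] (PySem.Set.ofList [start.toList]) 0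
      (fun x => PySem.Set.mem_ofList _ x) (fun x => Iff.rfl)
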